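-- pv_equiv track=rewrite | github.com/timer26/snake_game | main.py | border_generator
-- ===== SOURCE A (Python) =====
-- def border_generator(res_x: int, res_y: int)-> list:
--     screen = []
--     for y in range(res_y):
--         temp_list = []
--         for x in range(res_x):
--             # generate top and bottom border
--             if y == 0 or y == res_y - 1:
--                 temp_list.append("+") if x == 0 or x == res_x - 1 else temp_list.append("---")
--             # generate side borders
--             elif x == 0 or x == res_x - 1:
--                 temp_list.append("|")
--             # generate field
--             else:
--                 temp_list.append("   ")
--         screen.append(temp_list)
--     return screen
-- ===== SOURCE B (Python) =====
-- def border_generator(res_x: int, res_y: int) -> list: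
--     # Frame combinator: a sequence of n items with distinguished first/last
--     # elements, built from segments (no per-cell index branching).
--     def framed(first, mid, last, n):
--         if n <= 0:
--             return []
--         if n == 1:
--             return [first]
--         return [first] + [mid] * (n - 2) + [last]
--
--     if res_y <= 0:
--         return []
--     top = framed("+", "---", "+", res_x)
--     side = framed("|", "   ", "|", res_x)
--     # frame the rows themselves, copying each so rows are independent lists
--     return [list(row) for row in framed(top, side, top, res_y)]
-- ===== Notes on version B (the rewrite author's own statement) =====
-- stated objective: simpler
-- what changed: Replaces A's nested loop with per-cell y/x edge branching by a single 'framed' segment combinator ([first] + [mid]*(n-2) + [last]) applied once along x to build the two row kinds and once along y to frame the rows, so the grid is assembled from replicated segments with no per-cell conditionals.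
import Mathlib
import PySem

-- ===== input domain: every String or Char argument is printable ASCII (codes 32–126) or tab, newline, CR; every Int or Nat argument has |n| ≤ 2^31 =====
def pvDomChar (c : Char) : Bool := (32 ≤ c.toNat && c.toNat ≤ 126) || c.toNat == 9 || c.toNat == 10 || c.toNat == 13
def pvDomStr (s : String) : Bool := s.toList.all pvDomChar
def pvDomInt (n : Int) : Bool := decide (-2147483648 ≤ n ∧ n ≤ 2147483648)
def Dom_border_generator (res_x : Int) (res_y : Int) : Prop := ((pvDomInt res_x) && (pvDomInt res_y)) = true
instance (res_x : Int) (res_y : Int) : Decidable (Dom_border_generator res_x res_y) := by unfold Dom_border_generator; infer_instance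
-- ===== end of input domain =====

-- B replaces A's nested per-cell index branching by a single 'framed' segment
-- combinator (first ++ repeated middle ++ last) applied at both axes (objective: simpler).

-- ===== PORT A =====
def border_generator (res_x : Int) (res_y : Int) : List (List String) :=
  (PySem.List.pyRange 0 res_y 1).foldl (fun screen y =>
    screen ++ [(PySem.List.pyRange 0 res_x 1).foldl (fun temp_list x =>
      if y = 0 ∨ y = res_y - 1 then
        (if x = 0 ∨ x = res_x - 1 then temp_list ++ ["+"] else temp_list ++ ["---"])
      else if x = 0 ∨ x = res_x - 1 then temp_list ++ ["|"]
      else temp_list ++ ["   "]) []]) []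

-- ===== PORT B =====
-- framed(first, mid, last, n) = [first] + [mid]*(n-2) + [last] with the degenerate cases;
-- [mid]*(n-2) is List.replicate (n-2).toNat mid (exact: Python list repetition with a
-- non-positive count is the empty list, matching toNat's clamp under the n>1 guard's complement... n≥2 here).
def framed {α : Type} (first : α) (mid : α) (last : α) (n : Int) : List α :=
  if n ≤ 0 then []
  else if n = 1 then [first]
  else [first] ++ List.replicate (n - 2).toNat mid ++ [last]

def border_generator_alt (res_x : Int) (res_y : Int) : List (List String) :=
  if res_y ≤ 0 then [] else
  let top := framed "+" "---" "+" res_x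
  let side := framed "|" "   " "|" res_x
  -- 'list(row)' copies a row; on values this is the identity
  (framed top side top res_y).map (fun row => row)

-- ===== PRECONDITION & SPEC =====
def Spec_border_generator (res_x : Int) (res_y : Int) (out : List (List String)) : Prop := out = border_generator_alt res_x res_y
instance (res_x : Int) (res_y : Int) (out : List (List String)) : Decidable (Spec_border_generator res_x res_y out) := by unfold Spec_border_generator; infer_instance

-- ===== CLAIM (what is proved, stated in full; the proofs are below) =====
def Claim_equal_border_generator : Prop := ∀ (res_x : Int) (res_y : Int), Dom_border_generator res_x res_y → Spec_border_generator res_x res_y (border_generator res_x res_y)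

-- ===== LEMMAS AND PROOFS =====

theorem map_const_range {α : Type} (b : α) (t : Nat) :
    (List.range t).map (fun _ => b) = List.replicate t b := by
  induction t with
  | zero => rfl
  | succ k ih => rw [List.range_succ, List.map_append, ih, List.replicate_succ']; rfl

theorem range_map_edge {α : Type} (a b : α) (m : Nat) (h : 2 ≤ m) :
    (List.range m).map (fun k => if k = 0 ∨ k = m - 1 then a else b)
      = a :: (List.replicate (m - 2) b ++ [a]) := by
  obtain ⟨t, rfl⟩ : ∃ t, m = t + 2 := ⟨m - 2, by omega⟩
  rw [List.range_succ, List.map_append, List.range_succ_eq_map, List.map_cons,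
      List.map_map]
  have hmid : (List.range t).map ((fun k => if k = 0 ∨ k = t + 2 - 1 then a else b) ∘ (· + 1))
      = List.replicate t b := by
    rw [← map_const_range b t]
    exact List.map_congr_left (fun k hk => by
      have : k < t := List.mem_range.mp hk
      simp only [Function.comp]
      rw [if_neg]; omega)
  rw [hmid]
  simp

-- the x- (and y-) edge selection over a python range IS the framed segment list
theorem map_edge_framed {α : Type} (a b : α) (n : Int) :
    (PySem.List.pyRange 0 n 1).map (fun x => if x = 0 ∨ x = n - 1 then a else b)
      = framed a b a n := by
  unfold framed
  by_cases h0 : n ≤ 0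
  · rw [PySem.List.pyRange_one_eq_nil h0]; simp [h0]
  · by_cases h1 : n = 1
    · subst h1
      rw [PySem.List.pyRange_one_cons (by norm_num)]
      norm_num [PySem.List.pyRange_one_eq_nil]
    · have h2 : 2 ≤ n := by omega
      rw [PySem.List.pyRange_one, List.map_map]
      have hm : 2 ≤ n.toNat := by omega
      have : (List.range n.toNat).map ((fun x => if x = 0 ∨ x = n - 1 then a else b) ∘ (fun k : Nat => (0 : Int) + k))
          = (List.range n.toNat).map (fun k => if k = 0 ∨ k = n.toNat - 1 then a else b) :=
        List.map_congr_left (fun k hk => by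
          have : k < n.toNat := List.mem_range.mp hk
          simp only [Function.comp, zero_add]
          congr 1
          rw [eq_iff_iff]
          omega)
      simp only [sub_zero]
      rw [this, range_map_edge a b n.toNat hm]
      have : (n.toNat - 2) = (n - 2).toNat := by omega
      rw [this]
      simp [h0, h1]

-- A's inner row loop: per-cell appends equal mapping the edge selector
theorem row_fold_eq_map (res_x : Int) (a b : String) :
    (PySem.List.pyRange 0 res_x 1).foldl
      (fun temp_list x => if x = 0 ∨ x = res_x - 1 then temp_list ++ [a] else temp_list ++ [b]) []
    = (PySem.List.pyRange 0 res_x 1).map (fun x => if x = 0 ∨ x = res_x - 1 then a else b) := by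
  have h : ∀ (acc : List String) (x : Int), x ∈ PySem.List.pyRange 0 res_x 1 →
      (if x = 0 ∨ x = res_x - 1 then acc ++ [a] else acc ++ [b])
        = acc ++ [if x = 0 ∨ x = res_x - 1 then a else b] := by
    intro acc x _; split_ifs <;> rfl
  trans (List.foldl (fun acc x => acc ++ [if x = 0 ∨ x = res_x - 1 then a else b]) []
      (PySem.List.pyRange 0 res_x 1))
  · exact PySem.List.foldl_congr_mem _ _ _ _ h
  · rw [PySem.List.foldl_append_singleton_eq_map]; simp

-- ===== VERDICT (by name: the statement is the Claim_ definition above) =====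
theorem border_generator_spec : Claim_equal_border_generator := by
  intro res_x res_y _
  unfold Spec_border_generator border_generator border_generator_alt
  by_cases hy0 : res_y ≤ 0
  · simp [hy0, PySem.List.pyRange_one_eq_nil hy0]
  simp only [hy0, if_false]
  rw [PySem.List.foldl_append_singleton_eq_map
        (f := fun y => (PySem.List.pyRange 0 res_x 1).foldl (fun temp_list x =>
          if y = 0 ∨ y = res_y - 1 then
            (if x = 0 ∨ x = res_x - 1 then temp_list ++ ["+"] else temp_list ++ ["---"])
          else if x = 0 ∨ x = res_x - 1 then temp_list ++ ["|"]
          else temp_list ++ ["   "]) [])]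
  simp only [List.nil_append, List.map_id']
  rw [← map_edge_framed (framed "+" "---" "+" res_x) (framed "|" "   " "|" res_x) res_y]
  apply List.map_congr_left
  intro y _
  by_cases hy : y = 0 ∨ y = res_y - 1
  · simp only [hy, if_pos]
    rw [row_fold_eq_map res_x "+" "---", map_edge_framed]
  · simp only [hy, if_false]
    rw [row_fold_eq_map res_x "|" "   ", map_edge_framed]
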